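-- pv_equiv track=rewrite | github.com/yusuf-madkour/Toy-projects | 2-Life/src/life.py | moore_neighbours
-- ===== SOURCE A (Python) =====
-- def moore_neighbours(board):
--     ns = [[[] for _ in row] for row in board]
--     for i, row in enumerate(board):
--         for j, _ in enumerate(row):
--             if i > 0:
--                 ns[i][j].extend(board[i-1][max(0, j-1):j+2])
--             if i < len(board)-1:
--                 ns[i][j].extend(board[i+1][max(0, j-1):j+2])
--             if j > 0:
--                 ns[i][j].append(board[i][j-1])
--             if j < len(board[i])-1:
--                 ns[i][j].append(board[i][j+1])
--     return ns
-- ===== SOURCE B (Python) =====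
-- DIRS = [(-1, -1), (-1, 0), (-1, 1), (1, -1), (1, 0), (1, 1), (0, -1), (0, 1)]
--
-- def moore_neighbours(board):
--     n = len(board)
--     return [[[board[i + di][j + dj]
--               for di, dj in DIRS
--               if 0 <= i + di < n and 0 <= j + dj < len(board[i + di])]
--              for j in range(len(row))]
--             for i, row in enumerate(board)]
-- ===== Notes on version B (the rewrite author's own statement) =====
-- stated objective: idiomatic
-- what changed: Replaces the per-row slice extends plus separate left/right appends and the ns mutation with a single uniform scan over an 8-direction offset list, building each cell's neighbour list directly in one comprehension.
import Mathlib
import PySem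

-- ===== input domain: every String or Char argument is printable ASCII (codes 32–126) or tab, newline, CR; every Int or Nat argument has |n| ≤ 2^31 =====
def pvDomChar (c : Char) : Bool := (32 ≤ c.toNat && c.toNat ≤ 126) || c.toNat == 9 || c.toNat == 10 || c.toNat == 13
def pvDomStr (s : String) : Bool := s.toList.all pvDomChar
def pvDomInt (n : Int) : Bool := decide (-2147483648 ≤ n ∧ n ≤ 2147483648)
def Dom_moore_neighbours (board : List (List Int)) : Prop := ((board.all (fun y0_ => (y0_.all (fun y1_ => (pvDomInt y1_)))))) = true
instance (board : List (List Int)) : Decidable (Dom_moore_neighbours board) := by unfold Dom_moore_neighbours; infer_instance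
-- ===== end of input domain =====

-- B replaces A's row-slice extends + separate left/right appends (mutating ns in place) by one
-- uniform scan over an 8-direction offset list per cell; same values in the same order, same cost.


-- ===== PORT A =====
-- A mutates only ns[i][j] during the (i, j) iteration, so the cell's final value is the
-- concatenation of the four conditional pieces in source order; indices are in range, so
-- List.getD transcribes the (nonnegative-index) board[...] accesses exactly.
def mooreCellA (board : List (List Int)) (i j : Nat) : List Int :=
  (if 0 < i then
    PySem.List.slice (board.getD (i-1) []) (some (max 0 ((j:Int)-1))) (some ((j:Int)+2)) else []) ++
  (if i < board.length - 1 then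
    PySem.List.slice (board.getD (i+1) []) (some (max 0 ((j:Int)-1))) (some ((j:Int)+2)) else []) ++
  (if 0 < j then [(board.getD i []).getD (j-1) 0] else []) ++
  (if j < (board.getD i []).length - 1 then [(board.getD i []).getD (j+1) 0] else [])

def moore_neighbours (board : List (List Int)) : List (List (List Int)) :=
  board.zipIdx.map (fun ri => ri.1.zipIdx.map (fun xj => mooreCellA board ri.2 xj.2))

-- ===== PORT B =====
def pvDIRS : List (Int × Int) := [(-1,-1),(-1,0),(-1,1),(1,-1),(1,0),(1,1),(0,-1),(0,1)]

def mooreCellB (board : List (List Int)) (n : Nat) (i j : Nat) : List Int :=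
  pvDIRS.filterMap (fun d =>
    let r : Int := (i : Int) + d.1
    let c : Int := (j : Int) + d.2
    if 0 ≤ r ∧ r < (n : Int) ∧ 0 ≤ c ∧ c < ((board.getD r.toNat []).length : Int)
    then some ((board.getD r.toNat []).getD c.toNat 0) else none)

def moore_neighbours_alt (board : List (List Int)) : List (List (List Int)) :=
  board.zipIdx.map (fun ri =>
    (List.range ri.1.length).map (fun j => mooreCellB board board.length ri.2 j))

-- ===== PRECONDITION & SPEC =====
def Spec_moore_neighbours (board : List (List Int)) (out : List (List (List Int))) : Prop := out = moore_neighbours_alt board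
instance (board : List (List Int)) (out : List (List (List Int))) : Decidable (Spec_moore_neighbours board out) := by unfold Spec_moore_neighbours; infer_instance

-- ===== CLAIM (what is proved, stated in full; the proofs are below) =====
def Claim_equal_moore_neighbours : Prop := ∀ (board : List (List Int)), Dom_moore_neighbours board → Spec_moore_neighbours board (moore_neighbours board)

-- ===== LEMMAS AND PROOFS =====

-- one optional cell of a target row t at (possibly out-of-range) column c
def pvOpt (t : List Int) (c : Int) : List Int :=
  if 0 ≤ c ∧ c < (t.length : Int) then [t.getD c.toNat 0] else []

-- Nat-indexed form of pvOpt
def pvE (t : List Int) (m : Nat) : List Int := if m < t.length then [t.getD m 0] else []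

lemma pvOpt_natCast (t : List Int) (m : Nat) : pvOpt t (m : Int) = pvE t m := by
  simp [pvOpt, pvE]

lemma pvE_cons_succ (a : Int) (ts : List Int) (m : Nat) : pvE (a :: ts) (m+1) = pvE ts m := by
  simp [pvE, List.getD]

lemma take_two (t : List Int) : t.take 2 = pvE t 0 ++ pvE t 1 := by
  cases t with
  | nil => simp [pvE]
  | cons a ts =>
    cases ts with
    | nil => simp [pvE, List.getD]
    | cons b ts' => simp [pvE, List.getD]

lemma take_three_drop (t : List Int) (k : Nat) :
    (t.drop k).take 3 = pvE t k ++ pvE t (k+1) ++ pvE t (k+2) := by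
  induction t generalizing k with
  | nil => simp [pvE]
  | cons a ts ih =>
    cases k with
    | zero =>
      cases ts with
      | nil => simp [pvE, List.getD]
      | cons b ts' =>
        cases ts' with
        | nil => simp [pvE, List.getD]
        | cons c ts'' => simp [pvE, List.getD]
    | succ k' =>
      rw [List.drop_succ_cons, ih k', pvE_cons_succ,
        show k'+1+1 = k'+1+1 from rfl, pvE_cons_succ a ts (k'+1),
        show k'+2+1 = k'+1+2 by omega, pvE_cons_succ a ts (k'+2)]

lemma slice_window (t : List Int) (j : Nat) :
    PySem.List.slice t (some (max 0 ((j:Int)-1))) (some ((j:Int)+2)) =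
      pvOpt t ((j:Int)-1) ++ pvOpt t (j:Int) ++ pvOpt t ((j:Int)+1) := by
  cases j with
  | zero =>
    simp only [Nat.cast_zero, zero_sub, zero_add]
    rw [show (max 0 (-1 : Int)) = ((0:Nat) : Int) by decide,
        show ((2:Int)) = ((2:Nat) : Int) from rfl, PySem.List.slice_natCast,
        show (pvOpt t (-1)) = [] by simp [pvOpt],
        show ((0:Int)) = ((0:Nat) : Int) from rfl,
        show ((1:Int)) = ((1:Nat) : Int) from rfl,
        pvOpt_natCast, pvOpt_natCast]
    simpa using take_two t
  | succ k =>
    rw [show ((↑(k+1):Int)-1) = ((k:Nat):Int) by push_cast; ring,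
        show (max 0 ((k:Nat):Int)) = ((k:Nat):Int) by simp,
        show ((↑(k+1):Nat):Int)+2 = ((k:Nat):Int) + ((3:Nat):Int) by push_cast; ring,
        PySem.List.slice_natCast_add, take_three_drop,
        show ((↑(k+1):Nat):Int)+1 = ((↑(k+2):Nat):Int) by push_cast; ring,
        pvOpt_natCast, pvOpt_natCast, pvOpt_natCast]

lemma entry_eq (board : List (List Int)) (i j : Nat) (di dj : Int) :
    (if 0 ≤ (i:Int)+di ∧ (i:Int)+di < (board.length:Int) ∧ 0 ≤ (j:Int)+dj ∧
        (j:Int)+dj < ((board.getD ((i:Int)+di).toNat []).length:Int)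
     then [(board.getD ((i:Int)+di).toNat []).getD ((j:Int)+dj).toNat 0] else [])
    = if 0 ≤ (i:Int)+di ∧ (i:Int)+di < (board.length:Int)
      then pvOpt (board.getD ((i:Int)+di).toNat []) ((j:Int)+dj) else [] := by
  unfold pvOpt
  split_ifs with h1 h2 h3 h2 <;> first | rfl | tauto

lemma cell_eq (board : List (List Int)) (i j : Nat)
    (hi : i < board.length) (hj : j < (board.getD i []).length) :
    mooreCellA board i j = mooreCellB board board.length i j := by
  rw [mooreCellB, List.filterMap_eq_flatMap_toList]
  simp only [pvDIRS, List.flatMap_cons, List.flatMap_nil, List.append_nil, apply_ite Option.toList,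
    Option.toList_some, Option.toList_none]
  rw [mooreCellA]
  rw [entry_eq, entry_eq, entry_eq, entry_eq, entry_eq, entry_eq, entry_eq, entry_eq]
  rw [show ((i:Int)+(-1)).toNat = i - 1 by omega, show ((i:Int)+1).toNat = i + 1 by omega,
      show ((i:Int)+0).toNat = i by omega]
  have hup : (0 ≤ (i:Int)+(-1) ∧ (i:Int)+(-1) < (board.length:Int)) ↔ 0 < i := by omega
  have hdn : (0 ≤ (i:Int)+1 ∧ (i:Int)+1 < (board.length:Int)) ↔ i < board.length - 1 := by omega
  have hmid : (0 ≤ (i:Int)+0 ∧ (i:Int)+0 < (board.length:Int)) := by omega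
  simp only [hup, hdn, if_pos hmid]
  have hleft : pvOpt (board.getD i []) ((j:Int)+(-1)) =
      (if 0 < j then [(board.getD i []).getD (j-1) 0] else []) := by
    unfold pvOpt
    rw [show ((j:Int)+(-1)).toNat = j - 1 by omega]
    split_ifs with h1 h2 h2 <;> first | rfl | omega
  have hright : pvOpt (board.getD i []) ((j:Int)+1) =
      (if j < (board.getD i []).length - 1 then [(board.getD i []).getD (j+1) 0] else []) := by
    unfold pvOpt
    rw [show ((j:Int)+1).toNat = j + 1 by omega]
    split_ifs with h1 h2 h2 <;> first | rfl | omega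
  rw [hleft, hright]
  have hw : ∀ t : List Int,
      PySem.List.slice t (some (max 0 ((j:Int)-1))) (some ((j:Int)+2)) =
        pvOpt t ((j:Int)+(-1)) ++ pvOpt t ((j:Int)+0) ++ pvOpt t ((j:Int)+1) := by
    intro t
    rw [slice_window t j, show ((j:Int)+(-1)) = (j:Int)-1 by ring, show ((j:Int)+0) = (j:Int) by ring]
  by_cases h0 : 0 < i <;> by_cases h1 : i < board.length - 1 <;>
    simp only [h0, h1, if_pos] <;>
    simp [hw, List.append_assoc]

lemma outer_eq (board : List (List Int)) : moore_neighbours board = moore_neighbours_alt board := by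
  unfold moore_neighbours moore_neighbours_alt
  apply List.ext_getElem
  · simp
  · intro i h1 h2
    simp only [List.getElem_map, List.getElem_zipIdx, zero_add]
    apply List.ext_getElem
    · simp
    · intro j g1 g2
      simp only [List.getElem_map, List.getElem_zipIdx, List.getElem_range, zero_add]
      have hi : i < board.length := by simpa using h1
      have hj : j < (board.getD i []).length := by
        have : (board[i]'hi) = board.getD i [] := by
          simp [List.getD, List.getElem?_eq_getElem hi]
        simp at g1
        rw [← this]; simpa using g1
      exact cell_eq board i j hi hj

-- ===== VERDICT (by name: the statement is the Claim_ definition above) =====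
theorem moore_neighbours_spec : Claim_equal_moore_neighbours := by
  intro board _
  unfold Spec_moore_neighbours
  exact outer_eq board
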